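-- pv_equiv track=rewrite | github.com/s-karki/MBTALive | MBTA.py | get_lines
-- ===== SOURCE A (Python) =====
-- def get_lines(station_codes):
--     lines = []
--     for code in station_codes:
--         if code[0] == "R":
--             this_line = "Red"
--         elif code[0] == "B":
--             this_line = "Blue"
--         else:
--             this_line = "Orange"
--
--         if this_line not in lines:
--             lines.append(this_line)
--     return lines
-- ===== SOURCE B (Python) =====
-- def get_lines(station_codes):
--     names = ["Red" if c[0] == "R" else "Blue" if c[0] == "B" else "Orange"
--              for c in station_codes]
--     present = [line for line in ("Red", "Blue", "Orange") if line in names]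
--     present.sort(key=names.index)
--     return present
-- ===== Notes on version B (the rewrite author's own statement) =====
-- stated objective: alternative
-- what changed: Instead of A's single interleaved classify-and-dedup loop with a membership test on the growing output, B classifies all codes, selects which of the three canonical line names occur at all, and sorts those by index of first occurrence; first-appearance order is exactly increasing first-occurrence index.
import Mathlib
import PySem

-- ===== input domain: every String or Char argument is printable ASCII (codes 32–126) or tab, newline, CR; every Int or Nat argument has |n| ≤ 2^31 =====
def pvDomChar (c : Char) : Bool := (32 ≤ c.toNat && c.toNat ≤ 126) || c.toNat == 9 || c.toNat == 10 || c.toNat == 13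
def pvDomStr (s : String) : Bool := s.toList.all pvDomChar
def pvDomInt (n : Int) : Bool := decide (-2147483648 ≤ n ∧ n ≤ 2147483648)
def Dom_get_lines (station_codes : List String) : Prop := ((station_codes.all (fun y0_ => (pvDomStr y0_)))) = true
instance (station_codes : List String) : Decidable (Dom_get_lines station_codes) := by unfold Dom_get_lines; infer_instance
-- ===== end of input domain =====

-- B replaces A's interleaved classify-and-dedup loop by a different algorithm: classify all
-- codes, pick which of the three canonical line names occur, and sort those by index of
-- first occurrence; same cost, return value identical.

-- ===== PORT A =====
def get_lines (station_codes : List String) : List String :=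
  station_codes.foldl (fun lines code =>
    let this_line :=
      if PySem.Str.pyGet? code 0 = some 'R' then "Red"
      else if PySem.Str.pyGet? code 0 = some 'B' then "Blue"
      else "Orange"
    if this_line ∈ lines then lines else lines ++ [this_line]) []

-- ===== PORT B =====
-- "Red" if c[0] == "R" else "Blue" if c[0] == "B" else "Orange"
def pvClassify (code : String) : String :=
  if PySem.Str.pyGet? code 0 = some 'R' then "Red"
  else if PySem.Str.pyGet? code 0 = some 'B' then "Blue"
  else "Orange"

-- names.index(line): every element of `present` is a member of `names`, so Python's
-- list.index always succeeds there; the `.getD 0` arm of index? is unreachable.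
def get_lines_alt (station_codes : List String) : List String :=
  let names := station_codes.map pvClassify
  let present := ["Red", "Blue", "Orange"].filter (fun line => decide (line ∈ names))
  PySem.List.sorted present (fun line => (PySem.List.index? names line).getD 0) false

-- ===== PRECONDITION & SPEC =====
-- Pre_ excludes lists containing an empty code, on which Python A raises IndexError at code[0]
-- (B's comprehension raises there too).
def Pre_get_lines (station_codes : List String) : Prop :=
  ∀ code ∈ station_codes, code ≠ ""
instance (station_codes : List String) : Decidable (Pre_get_lines station_codes) := by
  unfold Pre_get_lines; infer_instance

def pvWitness_get_lines : List String := ["OAK", "RAL", "BOW", "RBX"]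

def Spec_get_lines (station_codes : List String) (out : List String) : Prop := out = get_lines_alt station_codes
instance (station_codes : List String) (out : List String) : Decidable (Spec_get_lines station_codes out) := by unfold Spec_get_lines; infer_instance

-- ===== CLAIM (what is proved, stated in full; the proofs are below) =====
def Claim_equal_get_lines : Prop := ∀ (station_codes : List String), Dom_get_lines station_codes → Pre_get_lines station_codes → Spec_get_lines station_codes (get_lines station_codes)

-- ===== LEMMAS AND PROOFS =====

-- A's loop is the first-occurrence dedup (Set.ofList) of the classified names.
theorem pvFold_eq (cs : List String) (acc : List String) :
    cs.foldl (fun lines code =>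
      let this_line :=
        if PySem.Str.pyGet? code 0 = some 'R' then "Red"
        else if PySem.Str.pyGet? code 0 = some 'B' then "Blue"
        else "Orange"
      if this_line ∈ lines then lines else lines ++ [this_line]) acc
    = List.foldl PySem.Set.add acc (cs.map pvClassify) := by
  induction cs generalizing acc with
  | nil => rfl
  | cons c cs ih =>
    simp only [List.foldl_cons, List.map_cons]
    rw [← ih]
    congr 1
    simp only [pvClassify, PySem.Set.add]
    split <;> simp_all

-- Every classified name is one of the three canonical line names.
theorem pvClassify_mem3 (c : String) : pvClassify c ∈ ["Red", "Blue", "Orange"] := by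
  unfold pvClassify; split <;> [skip; split] <;> simp

-- A member's first-occurrence index is defined and below the length.
theorem pv_idx_lt {xs : List String} {a : String} (h : a ∈ xs) :
    (PySem.List.index? xs a).getD 0 < xs.length := by
  cases hi : PySem.List.index? xs a with
  | none => exact absurd ((PySem.List.index?_eq_none_iff xs a).mp hi) (not_not_intro h)
  | some k =>
    obtain ⟨hk, -, -⟩ := PySem.List.getElem_of_index?_eq_some hi
    simpa using hk

-- The first-occurrence dedup of xs is strictly increasing in first-occurrence index.
theorem pv_pairwise_ofList (xs : List String) :
    List.Pairwise (fun a b => (PySem.List.index? xs a).getD 0 < (PySem.List.index? xs b).getD 0)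
      (PySem.Set.ofList xs) := by
  induction xs using List.reverseRecOn with
  | nil => simp [PySem.Set.ofList]
  | append_singleton xs x ih =>
    have hofl : PySem.Set.ofList (xs ++ [x]) = PySem.Set.add (PySem.Set.ofList xs) x := by
      simp [PySem.Set.ofList_eq_foldl, List.foldl_append]
    have hmem : ∀ a ∈ PySem.Set.ofList xs, a ∈ xs := fun a ha =>
      (PySem.Set.mem_ofList xs a).mp ha
    have hidx : ∀ a ∈ xs, PySem.List.index? (xs ++ [x]) a = PySem.List.index? xs a :=
      fun a ha => PySem.List.index?_append_of_mem [x] ha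
    by_cases hx : x ∈ xs
    · have : PySem.Set.add (PySem.Set.ofList xs) x = PySem.Set.ofList xs := by
        simp [PySem.Set.add, PySem.Set.mem_ofList, hx]
      rw [hofl, this]
      exact ih.imp_of_mem (fun {a b} ha hb hab => by
        rw [hidx a (hmem a ha), hidx b (hmem b hb)]; exact hab)
    · have : PySem.Set.add (PySem.Set.ofList xs) x = PySem.Set.ofList xs ++ [x] := by
        simp [PySem.Set.add, PySem.Set.mem_ofList, hx]
      rw [hofl, this, List.pairwise_append]
      refine ⟨ih.imp_of_mem (fun {a b} ha hb hab => by
          rw [hidx a (hmem a ha), hidx b (hmem b hb)]; exact hab),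
        List.pairwise_singleton _ _, ?_⟩
      intro a ha b hb
      rw [List.mem_singleton] at hb
      rw [hb, hidx a (hmem a ha), PySem.List.index?_append_singleton_self xs x hx]
      simpa using pv_idx_lt (hmem a ha)

-- A's result is a permutation of B's filtered candidate list.
theorem pv_perm (cs : List String) :
    (PySem.Set.ofList (cs.map pvClassify)).Perm
      (["Red", "Blue", "Orange"].filter (fun line => decide (line ∈ cs.map pvClassify))) := by
  have h3 : (["Red", "Blue", "Orange"] : List String).Nodup := by decide
  rw [List.perm_ext_iff_of_nodup (PySem.Set.nodup_ofList _) (h3.filter _)]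
  intro a
  rw [PySem.Set.mem_ofList, List.mem_filter]
  constructor
  · intro ha
    refine ⟨?_, by simpa using ha⟩
    obtain ⟨c, -, rfl⟩ := List.mem_map.mp ha
    exact pvClassify_mem3 c
  · intro h
    simpa using h.2

-- ===== VERDICT (by name: the statement is the Claim_ definition above) =====
theorem get_lines_spec : Claim_equal_get_lines := by
  intro station_codes _ _
  unfold Spec_get_lines get_lines get_lines_alt
  rw [pvFold_eq station_codes [], ← PySem.Set.ofList_eq_foldl]
  exact (PySem.List.sorted_eq_of_perm_of_pairwise_lt _ _ _
    (pv_perm station_codes) (pv_pairwise_ofList (station_codes.map pvClassify))).symm
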